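-- pv_equiv track=rewrite | github.com/shuvamandas-ux/Rd- | binary_xo.py | binary_xo
-- ===== SOURCE A (Python) =====
-- def binary_xo(n):
--     """
--     Convert an integer to its binary representation using X for 1 and O for 0.
--     """
--     if n == 0:
--         return 'O'
--     binary = ''
--     while n > 0:
--         binary = ('X' if n % 2 == 1 else 'O') + binary
--         n //= 2
--     return binary
-- ===== SOURCE B (Python) =====
-- def binary_xo(n):
--     if n == 0:
--         return 'O'
--     return bin(n)[2:].translate(str.maketrans('01', 'OX'))
-- ===== Notes on version B (the rewrite author's own statement) =====
-- stated objective: idiomatic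
-- what changed: Replaces the hand-written divide-and-prepend loop by the built-in bin() conversion followed by a character translation of '0'/'1' to 'O'/'X'; Pre_ excludes negative n, an unspecified corner where A's never-entered loop yields '' while B's bin-based translation yields a different string, neither being a specified X/O representation.
-- outside the precondition, e.g. on binary_xo(-5): A returns '', B returns 'bXOX'
import Mathlib
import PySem

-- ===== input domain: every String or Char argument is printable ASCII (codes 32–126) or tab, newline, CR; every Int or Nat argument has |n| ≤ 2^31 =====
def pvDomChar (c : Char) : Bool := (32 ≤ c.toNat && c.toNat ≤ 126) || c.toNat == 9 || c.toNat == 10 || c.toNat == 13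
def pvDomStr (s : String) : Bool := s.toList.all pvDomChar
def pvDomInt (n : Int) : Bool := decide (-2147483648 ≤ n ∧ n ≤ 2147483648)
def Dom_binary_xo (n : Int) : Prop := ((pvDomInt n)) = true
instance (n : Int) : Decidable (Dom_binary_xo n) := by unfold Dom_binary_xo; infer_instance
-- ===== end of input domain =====

-- B replaces A's divide-and-prepend loop by the built-in binary conversion (bin) plus a
-- digit translation '0'/'1' → 'O'/'X' (objective: idiomatic; return value only).

-- ===== PORT A =====
-- the while loop: state is the accumulated character list (strings handled as List Char)
def binary_xo_loop (n : Int) (binary : List Char) : List Char :=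
  if _h : 0 < n then
    binary_xo_loop (PySem.Int.floordiv n 2)
      ((if PySem.Int.mod n 2 = 1 then 'X' else 'O') :: binary)
  else binary
termination_by n.toNat
decreasing_by
  have := PySem.Int.floordiv_eq_ediv_of_pos (a := n) (b := 2) (by omega)
  omega

def binary_xo (n : Int) : String :=
  if n = 0 then "O" else String.mk (binary_xo_loop n [])

-- ===== PORT B =====
-- port of Python's bin: digit characters of |n|, most significant first
def pyBinDigits (m : Nat) : List Char :=
  if m = 0 then [] else pyBinDigits (m / 2) ++ [if m % 2 = 1 then '1' else '0']

-- bin(n)[2:]: for negative n the slice keeps the 'b' of '-0b…'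
def pyBinFrom2 (n : Int) : List Char :=
  if n < 0 then 'b' :: pyBinDigits (-n).toNat else pyBinDigits n.toNat

-- the str.maketrans('01','OX') translation table, applied per character
def xoTrans (c : Char) : Char :=
  if c = '0' then 'O' else if c = '1' then 'X' else c

def binary_xo_alt (n : Int) : String :=
  if n = 0 then "O" else String.mk ((pyBinFrom2 n).map xoTrans)

-- ===== PRECONDITION & SPEC =====
-- Pre_ excludes negative n, an unspecified corner: A's loop never runs and yields '',
-- while B's bin-based translation yields a different string; neither is a specified value.
def Pre_binary_xo (n : Int) : Prop := 0 ≤ n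
instance (n : Int) : Decidable (Pre_binary_xo n) := by unfold Pre_binary_xo; infer_instance
def pvWitness_binary_xo : Int := (6)

def Spec_binary_xo (n : Int) (out : String) : Prop := out = binary_xo_alt n
instance (n : Int) (out : String) : Decidable (Spec_binary_xo n out) := by unfold Spec_binary_xo; infer_instance

-- ===== CLAIM (what is proved, stated in full; the proofs are below) =====
def Claim_equal_binary_xo : Prop := ∀ (n : Int), Dom_binary_xo n → Pre_binary_xo n → Spec_binary_xo n (binary_xo n)

-- ===== LEMMAS AND PROOFS =====

-- the loop prepends exactly the translated binary digits of m
theorem binary_xo_loop_eq (m : Nat) :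
    ∀ acc : List Char, binary_xo_loop (m : Int) acc = (pyBinDigits m).map xoTrans ++ acc := by
  induction m using Nat.strong_induction_on with
  | _ m ih =>
    intro acc
    by_cases hm : m = 0
    · subst hm
      rw [binary_xo_loop, pyBinDigits]
      simp
    · rw [binary_xo_loop, pyBinDigits]
      have h0 : (0 : Int) < (m : Int) := by omega
      have hfd : PySem.Int.floordiv (m : Int) 2 = ((m / 2 : Nat) : Int) :=
        PySem.Int.floordiv_natCast m 2
      have hmd : PySem.Int.mod (m : Int) 2 = ((m % 2 : Nat) : Int) :=
        PySem.Int.mod_natCast m 2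
      rw [dif_pos h0, hfd, ih (m / 2) (by omega)]
      simp only [hm]
      have hdig : (if PySem.Int.mod (m : Int) 2 = 1 then 'X' else 'O')
          = xoTrans (if m % 2 = 1 then '1' else '0') := by
        rw [hmd]
        by_cases hp : m % 2 = 1
        · simp [hp, xoTrans]
        · have : m % 2 = 0 := by omega
          simp [this, xoTrans]
      rw [hdig]
      simp

-- ===== VERDICT (by name: the statement is the Claim_ definition above) =====
theorem binary_xo_spec : Claim_equal_binary_xo := by
  intro n _ hpre
  unfold Pre_binary_xo at hpre
  unfold Spec_binary_xo binary_xo binary_xo_alt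
  by_cases h0 : n = 0
  · simp [h0]
  · rw [if_neg h0, if_neg h0]
    have hn : n = ((n.toNat : Nat) : Int) := by omega
    rw [hn, binary_xo_loop_eq n.toNat []]
    unfold pyBinFrom2
    rw [if_neg (by omega)]
    have hmax : max n 0 = n := by omega
    simp [hmax]
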